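-- pv_equiv track=rewrite | github.com/H0r4c3/Challenges | py.checkio.org/greedy_number.py | greedy_number
-- ===== SOURCE A (Python) =====
-- def greedy_number(line: str, length: int) -> str:
--     length -= 1
--
--     if not length:
--       return max(line)
--
--     digit = max(line[:-length])
--     line = line.partition(digit)[2]
--
--     # recurrention
--     result = digit + greedy_number(line, length)
--
--     return result
-- ===== SOURCE B (Python) =====
-- def greedy_number(line: str, length: int) -> str:
--     # same domain as the original: it needs 1 <= length <= len(line) (elsewhere it hits max('') and raises ValueError)
--     if not (1 <= length <= len(line)):
--         raise ValueError("length must satisfy 1 <= length <= len(line)")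
--     # monotonic stack, single left-to-right pass
--     stack = []
--     n = len(line)
--     for i, c in enumerate(line):
--         rem = n - i - 1
--         while stack and stack[-1] < c and len(stack) + rem >= length:
--             stack.pop()
--         stack.append(c)
--     return ''.join(stack[:length])
-- ===== Notes on version B (the rewrite author's own statement) =====
-- stated objective: faster
-- what changed: Replaced A's recursive pick-the-window-maximum-then-cut (a max scan plus partition per output character) by a single left-to-right monotonic-stack pass that pops smaller characters while enough characters remain, then takes the first `length` stack entries.
import Mathlib
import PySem

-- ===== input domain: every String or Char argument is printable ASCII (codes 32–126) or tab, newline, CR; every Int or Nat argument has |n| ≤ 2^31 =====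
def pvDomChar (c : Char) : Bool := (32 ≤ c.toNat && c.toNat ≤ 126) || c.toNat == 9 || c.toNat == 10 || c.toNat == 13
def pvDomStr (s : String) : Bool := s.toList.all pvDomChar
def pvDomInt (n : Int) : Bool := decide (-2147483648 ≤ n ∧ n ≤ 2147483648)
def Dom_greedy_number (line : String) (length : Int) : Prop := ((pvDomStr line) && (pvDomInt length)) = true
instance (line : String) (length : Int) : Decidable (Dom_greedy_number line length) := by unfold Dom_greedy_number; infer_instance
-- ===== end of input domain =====

-- B replaces A's per-character window-maximum recursion by one monotonic-stack pass (O(n*length) → O(n)).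

-- ===== PORT A =====

/-- `line.partition(digit)[2]`: the part after the first occurrence of `c` ("" when absent). Exact hand port. -/
def pvAfterFirst (c : Char) : List Char → List Char
  | [] => []
  | x :: xs => if x = c then xs else pvAfterFirst c xs

theorem pvAfterFirst_length_lt {c : Char} {l : List Char} (h : c ∈ l) :
    (pvAfterFirst c l).length < l.length := by
  induction l with
  | nil => cases h
  | cons x xs ih =>
    by_cases hx : x = c
    · simp [pvAfterFirst, hx]
    · have hc : c ∈ xs := by
        rcases List.mem_cons.mp h with h' | h'
        · exact absurd h'.symm hx
        · exact h'
      simp only [pvAfterFirst, if_neg hx, List.length_cons]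
      exact Nat.lt_succ_of_lt (ih hc)

/-- Literal port of A on `List Char`: decrement, base case `max(line)`,
    else `max(line[:-length])`, cut after its first occurrence, recurse.
    The `none` branches are where Python's `max('')` raises (outside `Pre_`). -/
def pvGreedyA (l : List Char) (length : Int) : List Char :=
  if length - 1 = 0 then
    match PySem.List.max? l (fun x => x) with
    | some d => [d]
    | none => []
  else
    match hm : PySem.List.max? (PySem.List.slice l none (some (-(length - 1)))) (fun x => x) with
    | none => []
    | some d => d :: pvGreedyA (pvAfterFirst d l) (length - 1)
termination_by l.length
decreasing_by
  exact pvAfterFirst_length_lt (PySem.List.mem_of_mem_slice _ _ _ (PySem.List.max?_mem hm))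

def greedy_number (line : String) (length : Int) : String :=
  String.ofList (pvGreedyA line.toList length)

-- ===== PORT B =====

/-- The inner `while`: pop while the top is smaller than `c` and `len(stack) + rem >= length`.
    Stack is kept top-first (Python's `stack[-1]` is the head here). -/
def pvPop (k : Nat) (c : Char) (rem : Nat) : List Char → List Char
  | [] => []
  | t :: s => if t < c ∧ k ≤ s.length + 1 + rem then pvPop k c rem s else t :: s

/-- The `for` loop over the characters; `rem` is the number of characters after the current one. -/
def pvRun (k : Nat) (s : List Char) : List Char → List Char
  | [] => s
  | c :: r => pvRun k (c :: pvPop k c r.length s) r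

/-- Port of B. B first validates `1 <= length <= len(line)` (raises outside `Pre_`, where this
    port's value is unclaimed); under `Pre_`, `length ≥ 1`, so `.toNat` is exact.
    `stack[:length]` = first `length` entries, bottom first = reverse of our top-first stack. -/
def greedy_number_alt (line : String) (length : Int) : String :=
  String.ofList (((pvRun length.toNat [] line.toList).reverse).take length.toNat)

-- ===== PRECONDITION & SPEC =====

-- Exactly the inputs on which A returns: otherwise the recursion reaches max('') and raises ValueError.
def Pre_greedy_number (line : String) (length : Int) : Prop :=
  1 ≤ length ∧ length ≤ (line.toList.length : Int)

instance (line : String) (length : Int) : Decidable (Pre_greedy_number line length) := by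
  unfold Pre_greedy_number; infer_instance

def pvWitness_greedy_number : String × Int := ("192304", 3)

def Spec_greedy_number (line : String) (length : Int) (out : String) : Prop :=
  out = greedy_number_alt line length

instance (line : String) (length : Int) (out : String) : Decidable (Spec_greedy_number line length out) := by
  unfold Spec_greedy_number; infer_instance

-- ===== CLAIM (what is proved, stated in full; the proofs are below) =====
def Claim_equal_greedy_number : Prop := ∀ (line : String) (length : Int), Dom_greedy_number line length → Pre_greedy_number line length → Spec_greedy_number line length (greedy_number line length)

-- ===== LEMMAS AND PROOFS =====

/-- Popping never invents elements. -/
theorem pvPop_subset {k : Nat} {c : Char} {rem : Nat} {s : List Char} {x : Char}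
    (h : x ∈ pvPop k c rem s) : x ∈ s := by
  induction s with
  | nil => simpa [pvPop] using h
  | cons t s ih =>
    simp only [pvPop] at h
    split at h
    · exact List.mem_cons_of_mem _ (ih h)
    · exact h

/-- If everything on the stack is smaller than `c` and at least `k` characters remain
    (including `c`), the whole stack is popped. -/
theorem pvPop_all {k : Nat} {c : Char} {rem : Nat} {s : List Char}
    (hlt : ∀ x ∈ s, x < c) (hk : k ≤ 1 + rem) : pvPop k c rem s = [] := by
  induction s with
  | nil => rfl
  | cons t s ih =>
    have : t < c ∧ k ≤ s.length + 1 + rem := ⟨hlt t (by simp), by omega⟩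
    simp only [pvPop, if_pos this]
    exact ih (fun x hx => hlt x (List.mem_cons_of_mem _ hx))

/-- Phase 1: with everything so far smaller than `d` and at least `k` characters left
    from `d` on, processing `p ++ d :: q` resets the stack to `[d]`. -/
theorem pvRun_phase1 {k : Nat} {d : Char} {q : List Char} :
    ∀ (p s : List Char), (∀ x ∈ s, x < d) → (∀ x ∈ p, x < d) → k ≤ 1 + q.length →
      pvRun k s (p ++ d :: q) = pvRun k [d] q := by
  intro p
  induction p with
  | nil =>
    intro s hs _ hk
    simp only [List.nil_append, pvRun]
    rw [pvPop_all hs hk]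
  | cons a p ih =>
    intro s hs hp hk
    simp only [List.cons_append, pvRun]
    refine ih _ ?_ (fun x hx => hp x (List.mem_cons_of_mem _ hx)) hk
    intro x hx
    rcases List.mem_cons.mp hx with h | h
    · exact h ▸ hp a (by simp)
    · exact hs x (pvPop_subset h)

/-- Popping over a sentinel `d` at the bottom: when either fewer than `k - 1` characters
    follow `c`, or `c ≤ d`, the sentinel stays and the rest pops exactly as with `k - 1`. -/
theorem pvPop_sentinel {k : Nat} {c d : Char} {rem : Nat} (hk : 1 ≤ k)
    (hblock : rem + 2 ≤ k ∨ c ≤ d) :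
    ∀ s : List Char, pvPop k c rem (s ++ [d]) = pvPop (k - 1) c rem s ++ [d] := by
  intro s
  induction s with
  | nil =>
    have : ¬ (d < c ∧ k ≤ List.length ([] : List Char) + 1 + rem) := by
      rcases hblock with h | h
      · rintro ⟨_, h2⟩
        simp only [List.length_nil, Nat.zero_add] at h2
        omega
      · rintro ⟨h1, _⟩
        exact absurd h (not_le.mpr h1)
    simp only [List.nil_append, pvPop, if_neg this]
  | cons t s ih =>
    have hcond : (t < c ∧ k ≤ (s ++ [d]).length + 1 + rem) ↔ (t < c ∧ k - 1 ≤ s.length + 1 + rem) := by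
      simp only [List.length_append, List.length_singleton]
      constructor <;> (rintro ⟨h1, h2⟩; exact ⟨h1, by omega⟩)
    simp only [List.cons_append, pvPop]
    by_cases hc : t < c ∧ k - 1 ≤ s.length + 1 + rem
    · rw [if_pos (hcond.mpr hc), if_pos hc, ih]
    · rw [if_neg (fun h => hc (hcond.mp h)), if_neg hc, List.cons_append]

/-- Phase 2: a bottom sentinel `d` that no admissible later character beats is inert:
    running with it equals running without it with budget `k - 1`, appending `d` below. -/
theorem pvRun_phase2 {k : Nat} {d : Char} (hk : 1 ≤ k) :
    ∀ (q s : List Char), (∀ (i : Nat) (h : i < q.length), i + k ≤ q.length → q[i] ≤ d) →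
      pvRun k (s ++ [d]) q = pvRun (k - 1) s q ++ [d] := by
  intro q
  induction q with
  | nil => intro s _; rfl
  | cons c q ih =>
    intro s hq
    have hblock : q.length + 2 ≤ k ∨ c ≤ d := by
      by_cases h : k ≤ q.length + 1
      · right
        have := hq 0 (by simp) (by simp; omega)
        simpa using this
      · left; omega
    simp only [pvRun]
    rw [pvPop_sentinel hk hblock, ← List.cons_append]
    refine ih _ ?_
    intro i hi hik
    have := hq (i + 1) (by simpa using Nat.succ_lt_succ hi) (by simpa using by omega)
    simpa using this

/-- Split `l` at the first occurrence of a maximum `d` of `l.take m`. -/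
theorem pvSplit : ∀ (l : List Char) (m : Nat) (d : Char), d ∈ l.take m →
    (∀ x ∈ l.take m, x ≤ d) →
    ∃ p, l = p ++ d :: pvAfterFirst d l ∧ (∀ x ∈ p, x < d) ∧ p.length < m := by
  intro l
  induction l with
  | nil => intro m d hd _; simp at hd
  | cons x xs ih =>
    intro m d hd hle
    match m with
    | 0 => simp at hd
    | m + 1 =>
      by_cases hx : x = d
      · refine ⟨[], ?_, by simp, by simp⟩
        simp [pvAfterFirst, hx]
      · have hd' : d ∈ xs.take m := by
          rcases List.mem_cons.mp (by simpa using hd) with h | h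
          · exact absurd h.symm hx
          · exact h
        have hle' : ∀ y ∈ xs.take m, y ≤ d := by
          intro y hy
          exact hle y (by simp [hy])
        obtain ⟨p, hsplit, hlt, hlen⟩ := ih m d hd' hle'
        refine ⟨x :: p, ?_, ?_, by simpa using Nat.succ_lt_succ hlen⟩
        · simp only [pvAfterFirst, if_neg hx]
          rw [List.cons_append, ← hsplit]
        · intro y hy
          rcases List.mem_cons.mp hy with h | h
          · subst h
            exact lt_of_le_of_ne (hle y (by simp)) hx
          · exact hlt y h

/-- Core decomposition of B's pass: if `d` is a maximum of the admissible window
    `l.take (l.length - k + 1)` and `l = p ++ d :: q` is the cut at its first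
    occurrence, the run produces `d` at the bottom and behaves as a `k - 1` run on `q`. -/
theorem pvRun_core {k : Nat} {l p q : List Char} {d : Char}
    (hk : 1 ≤ k) (hkl : k ≤ l.length)
    (hsplit : l = p ++ d :: q) (hp : ∀ x ∈ p, x < d)
    (hplen : p.length < l.length - k + 1)
    (hmax : ∀ x ∈ l.take (l.length - k + 1), x ≤ d) :
    pvRun k [] l = pvRun (k - 1) [] q ++ [d] := by
  have hlen : l.length = p.length + 1 + q.length := by
    subst hsplit; simp; omega
  have hq1 : k ≤ 1 + q.length := by omega
  rw [hsplit, pvRun_phase1 p [] (by simp) hp hq1]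
  have hqle : ∀ (i : Nat) (h : i < q.length), i + k ≤ q.length → q[i] ≤ d := by
    intro i hi hik
    have hpos : p.length + 1 + i < l.length - k + 1 := by omega
    have hposl : p.length + 1 + i < l.length := by omega
    have htk : p.length + 1 + i < (l.take (l.length - k + 1)).length := by
      rw [List.length_take]; omega
    have hmem : l[p.length + 1 + i]'hposl ∈ l.take (l.length - k + 1) := by
      rw [← List.getElem_take (j := l.length - k + 1) (h := htk)]
      exact List.getElem_mem _
    have hgl : l[p.length + 1 + i]'hposl = q[i]'hi := by
      subst hsplit
      rw [List.getElem_append_right (by omega)]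
      simp only [List.getElem_cons]
      split
      · omega
      · congr 1; omega
    rw [← hgl]
    exact hmax _ hmem
  have h0 : ([d] : List Char) = [] ++ [d] := rfl
  rw [h0, pvRun_phase2 hk q [] hqle]
  simp

/-- Main equivalence on lists, by induction on `k`. -/
theorem pvMain : ∀ (k : Nat) (l : List Char), 1 ≤ k → k ≤ l.length →
    (pvRun k [] l).reverse.take k = pvGreedyA l (k : Int) := by
  intro k
  induction k with
  | zero => intro l h; omega
  | succ k ih =>
    intro l _ hkl
    -- the admissible window and its maximum
    have hwlen : (l.take (l.length - (k + 1) + 1)).length = l.length - (k + 1) + 1 := by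
      rw [List.length_take]; omega
    have hwne : l.take (l.length - (k + 1) + 1) ≠ [] := by
      intro h; rw [h] at hwlen; simp at hwlen
    have hne : PySem.List.max? (l.take (l.length - (k + 1) + 1)) (fun x : Char => x) ≠ none :=
      fun h => hwne ((PySem.List.max?_eq_none_iff _ _).mp h)
    obtain ⟨d, hd⟩ := Option.ne_none_iff_exists'.mp hne
    have hdmem : d ∈ l.take (l.length - (k + 1) + 1) := PySem.List.max?_mem hd
    have hdmax : ∀ x ∈ l.take (l.length - (k + 1) + 1), x ≤ d := by
      intro x hx; exact PySem.List.max?_isMax hd x hx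
    obtain ⟨p, hsplit, hp, hplen⟩ := pvSplit l _ d hdmem hdmax
    have hcore := pvRun_core (k := k + 1) (l := l) (p := p) (q := pvAfterFirst d l) (d := d)
      (by omega) hkl hsplit hp hplen hdmax
    have hqlen : l.length = p.length + 1 + (pvAfterFirst d l).length := by
      conv_lhs => rw [hsplit]
      simp; omega
    rw [hcore]
    simp only [List.reverse_append, List.reverse_singleton, List.singleton_append,
      Nat.add_sub_cancel]
    rw [List.take_succ_cons]
    match k with
    | 0 =>
      -- length = 1 : A returns [max l]; the window is all of l
      have hl : l.take (l.length - 1 + 1) = l := by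
        rw [List.take_of_length_le]; omega
      rw [hl] at hd
      rw [pvGreedyA]
      rw [if_pos (by norm_num)]
      rw [hd]
      simp
    | k + 1 =>
      -- length >= 2 : A picks the window max and recurses
      have hih := ih (pvAfterFirst d l) (by omega) (by omega)
      rw [pvGreedyA]
      rw [if_neg (by push_cast; omega)]
      have hslice : PySem.List.slice l none (some (-(((k + 1 + 1 : Nat) : Int) - 1)))
          = l.take (l.length - (k + 1 + 1) + 1) := by
        have h1 : (((k + 1 + 1 : Nat) : Int) - 1) = ((k + 1 : Nat) : Int) := by push_cast; omega
        rw [h1, PySem.List.slice_to_neg_natCast l (k + 1) (by omega)]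
        congr 1
        omega
      split
      next heq =>
        rw [hslice] at heq
        rw [heq] at hd
        cases hd
      next d' heq =>
        rw [hslice] at heq
        rw [heq] at hd
        injection hd with hdd
        subst hdd
        congr 1
        rw [hih]
        congr 1
        push_cast
        omega

-- ===== VERDICT (by name: the statement is the Claim_ definition above) =====
theorem greedy_number_spec : Claim_equal_greedy_number := by
  intro line length _ hpre
  unfold Spec_greedy_number greedy_number greedy_number_alt
  obtain ⟨h1, h2⟩ := hpre
  have hK : length = ((length.toNat : Nat) : Int) := (Int.toNat_of_nonneg (by omega)).symm
  congr 1
  rw [pvMain length.toNat line.toList (by omega) (by omega), ← hK]
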